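-- pv_equiv track=rewrite | github.com/chrishan17/skill-router | skills/skill-router/scripts/skill_router.py | _set_disable_model_invocation_in_text
-- ===== SOURCE A (Python) =====
-- def _set_disable_model_invocation_in_text(content: str, enable: bool) -> tuple[str, bool]:
--     """Add or remove ``disable-model-invocation: true`` in a SKILL.md frontmatter.
--
--     Returns ``(new_content, was_changed)``.  Only the first frontmatter block is
--     modified.  When *enable* is True the field is inserted just before the closing
--     ``---``; when False the field line is removed entirely.
--     """
--     lines = content.splitlines(keepends=True)
--     if not lines or lines[0].strip() != "---":
--         return content, False
--
--     close_idx: int | None = None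
--     for i in range(1, len(lines)):
--         if lines[i].strip() == "---":
--             close_idx = i
--             break
--     if close_idx is None:
--         return content, False
--
--     field_idx: int | None = None
--     for i in range(1, close_idx):
--         if lines[i].startswith("disable-model-invocation:"):
--             field_idx = i
--             break
--
--     if enable:
--         if field_idx is not None:
--             current_val = lines[field_idx].split(":", 1)[1].strip().lower()
--             if current_val == "true":
--                 return content, False  # already enabled — no change needed
--             lines[field_idx] = "disable-model-invocation: true\n"
--         else:
--             lines.insert(close_idx, "disable-model-invocation: true\n")
--     else:
--         if field_idx is None:
--             return content, False  # field absent — nothing to remove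
--         lines.pop(field_idx)
--
--     return "".join(lines), True
-- ===== SOURCE B (Python) =====
-- FIELD_PREFIX = "disable-model-invocation:"
-- FIELD_LINE = "disable-model-invocation: true\n"
--
--
-- def _set_disable_model_invocation_in_text(content: str, enable: bool) -> tuple[str, bool]:
--     """Single left-to-right pass over the lines, building the output list."""
--     lines = content.splitlines(keepends=True)
--     if not lines or lines[0].strip() != "---":
--         return content, False
--
--     out = [lines[0]]
--     field_seen = False
--     closed = False
--     changed = False
--     for line in lines[1:]:
--         if not closed and line.strip() == "---":
--             closed = True
--             if enable and not field_seen: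
--                 out.append(FIELD_LINE)
--                 changed = True
--             out.append(line)
--         elif not closed and not field_seen and line.startswith(FIELD_PREFIX):
--             field_seen = True
--             if enable:
--                 if line.split(":", 1)[1].strip().lower() == "true":
--                     out.append(line)  # already enabled
--                 else:
--                     out.append(FIELD_LINE)
--                     changed = True
--             else:
--                 changed = True  # drop the line
--         else:
--             out.append(line)
--
--     if not closed or not changed:
--         return content, False
--     return "".join(out), True
-- ===== Notes on version B (the rewrite author's own statement) =====
-- stated objective: alternative
-- what changed: A finds the closing-fence and field-line indices with two index-range scans and then mutates the line list (set/insert/pop); B makes one left-to-right pass over the lines, building a new output list while tracking field_seen/closed/changed flags.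
import Mathlib
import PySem

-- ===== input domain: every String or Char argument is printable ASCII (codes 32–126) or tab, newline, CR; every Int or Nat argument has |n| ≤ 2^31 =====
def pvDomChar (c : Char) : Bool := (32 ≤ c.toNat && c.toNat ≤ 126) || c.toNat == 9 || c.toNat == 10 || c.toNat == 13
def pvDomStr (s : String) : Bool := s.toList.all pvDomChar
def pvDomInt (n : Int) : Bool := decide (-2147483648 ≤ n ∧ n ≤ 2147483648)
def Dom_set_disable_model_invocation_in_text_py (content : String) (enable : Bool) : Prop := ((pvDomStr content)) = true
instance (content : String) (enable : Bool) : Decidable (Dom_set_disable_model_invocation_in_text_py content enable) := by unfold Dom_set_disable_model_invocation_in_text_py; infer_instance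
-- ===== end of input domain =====

-- B replaces A's find-two-indices-then-mutate logic by a single left-to-right pass that
-- builds the output line list with flags (field_seen/closed/changed); same results, 'alternative' objective.

-- ===== shared helpers (both Pythons call content.splitlines(keepends=True), str.strip,
-- str.startswith and line.split(":",1)[1].strip().lower()) =====

-- splitlines(keepends=True): exact on the Dom charset, where the only line breaks are \n, \r, \r\n
def pvLine : List Char → List Char × List Char
  | [] => ([], [])
  | c :: cs =>
    if c = '\n' then (['\n'], cs)
    else if c = '\r' then
      if cs.head? = some '\n' then (['\r', '\n'], cs.tail) else (['\r'], cs)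
    else ((pvLine cs).1.cons c, (pvLine cs).2)

theorem pvLine_rest_lt : ∀ cs : List Char, cs ≠ [] → (pvLine cs).2.length < cs.length := by
  intro cs
  induction cs with
  | nil => simp
  | cons c cs ih =>
    intro _
    simp only [pvLine]
    split_ifs with h1 h2 h3
    · simp
    · simp only [List.length_cons]
      have : cs.tail.length ≤ cs.length := by cases cs <;> simp
      omega
    · simp
    · rcases cs with _ | ⟨c', cs'⟩
      · simp [pvLine]
      · have := ih (by simp)
        simp only [List.length_cons] at this ⊢
        omega

def pvSplitKeep : List Char → List (List Char)
  | [] => []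
  | c :: cs => (pvLine (c :: cs)).1 :: pvSplitKeep (pvLine (c :: cs)).2
termination_by s => s.length
decreasing_by exact pvLine_rest_lt _ (by simp)

def pvFence (l : List Char) : Bool := PySem.Chars.strip l == "---".toList
def pvFieldP (l : List Char) : Bool := PySem.Chars.startswith l "disable-model-invocation:".toList
def pvFieldLine : List Char := "disable-model-invocation: true\n".toList
-- line.split(":", 1)[1].strip().lower() == "true"  (index 1 exists whenever pvFieldP holds)
def pvValTrue (l : List Char) : Bool :=
  PySem.Chars.lower (PySem.Chars.strip ((PySem.Chars.splitOnMax l ":".toList 1).getD 1 [])) == "true".toList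

-- ===== PORT A =====

-- for i in range(1, len(lines)): if lines[i].strip() == "---": close_idx = i; break
def pvCloseA (lines : List (List Char)) (i : Nat) : Option Nat :=
  if i < lines.length then
    if pvFence (lines.getD i []) then some i else pvCloseA lines (i + 1)
  else none
termination_by lines.length - i

-- for i in range(1, close_idx): if lines[i].startswith("disable-model-invocation:"): field_idx = i; break
def pvFieldA (lines : List (List Char)) (i c : Nat) : Option Nat :=
  if i < c then
    if pvFieldP (lines.getD i []) then some i else pvFieldA lines (i + 1) c
  else none
termination_by c - i

def set_disable_model_invocation_in_text_py (content : String) (enable : Bool) : String × Bool :=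
  let lines := pvSplitKeep content.toList
  match lines with
  | [] => (content, false)
  | l0 :: _ =>
    if pvFence l0 = false then (content, false)
    else
      match pvCloseA lines 1 with
      | none => (content, false)
      | some close =>
        let field := pvFieldA lines 1 close
        if enable then
          match field with
          | some fi =>
            if pvValTrue (lines.getD fi []) then (content, false)
            else (String.mk (lines.set fi pvFieldLine).flatten, true)
          | none => (String.mk (PySem.List.insert lines (close : Int) pvFieldLine).flatten, true)
        else
          match field with
          | none => (content, false)
          | some fi => (String.mk (lines.eraseIdx fi).flatten, true)  -- lines.pop(fi), fi always in range

-- ===== PORT B =====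

-- the loop body of Source B: state (out, field_seen, closed, changed)
def pvStepB (enable : Bool) (st : List (List Char) × Bool × Bool × Bool) (line : List Char) :
    List (List Char) × Bool × Bool × Bool :=
  let (out, fieldSeen, closed, changed) := st
  if !closed && pvFence line then
    if enable && !fieldSeen then (out ++ [pvFieldLine, line], fieldSeen, true, true)
    else (out ++ [line], fieldSeen, true, changed)
  else if !closed && !fieldSeen && pvFieldP line then
    if enable then
      if pvValTrue line then (out ++ [line], true, closed, changed)
      else (out ++ [pvFieldLine], true, closed, true)
    else (out, true, closed, true)
  else (out ++ [line], fieldSeen, closed, changed)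

def set_disable_model_invocation_in_text_py_alt (content : String) (enable : Bool) : String × Bool :=
  match pvSplitKeep content.toList with
  | [] => (content, false)
  | l0 :: rest =>
    if pvFence l0 = false then (content, false)
    else
      let st := rest.foldl (pvStepB enable) ([l0], false, false, false)
      if !st.2.2.1 || !st.2.2.2 then (content, false)
      else (String.mk st.1.flatten, true)

-- ===== PRECONDITION & SPEC =====
def Spec_set_disable_model_invocation_in_text_py (content : String) (enable : Bool) (out : String × Bool) : Prop := out = set_disable_model_invocation_in_text_py_alt content enable
instance (content : String) (enable : Bool) (out : String × Bool) : Decidable (Spec_set_disable_model_invocation_in_text_py content enable out) := by unfold Spec_set_disable_model_invocation_in_text_py; infer_instance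

-- ===== CLAIM (what is proved, stated in full; the proofs are below) =====
def Claim_equal_set_disable_model_invocation_in_text_py : Prop := ∀ (content : String) (enable : Bool), Dom_set_disable_model_invocation_in_text_py content enable → Spec_set_disable_model_invocation_in_text_py content enable (set_disable_model_invocation_in_text_py content enable)

-- ===== LEMMAS AND PROOFS =====

-- first fence index, structurally
def fenceIdx : List (List Char) → Option Nat
  | [] => none
  | l :: ls => if pvFence l then some 0 else (fenceIdx ls).map (· + 1)

-- first field index below a bound, structurally
def fieldIdxB : List (List Char) → Nat → Option Nat
  | _, 0 => none
  | [], _ + 1 => none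
  | l :: ls, c + 1 => if pvFieldP l then some 0 else (fieldIdxB ls c).map (· + 1)

-- common canonical result on the lines after the opening fence
def canon (enable : Bool) (rest : List (List Char)) : Option (List (List Char) × Bool) :=
  match fenceIdx rest with
  | none => none
  | some c =>
    match fieldIdxB rest c with
    | some fi =>
      if enable then
        if pvValTrue (rest.getD fi []) then some (rest, false)
        else some (rest.set fi pvFieldLine, true)
      else some (rest.eraseIdx fi, true)
    | none =>
      if enable then some (rest.take c ++ pvFieldLine :: rest.drop c, true) else some (rest, false)

theorem pvCloseA_shift (ls : List (List Char)) (l : List Char) :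
    ∀ i, pvCloseA (l :: ls) (i + 1) = (pvCloseA ls i).map (· + 1) := by
  intro i
  fun_induction pvCloseA ls i with
  | case1 i hlt hf => rw [pvCloseA]; simp_all [List.getD_cons_succ]
  | case2 i hlt hf ih => rw [pvCloseA]; simp_all [List.getD_cons_succ]
  | case3 i hge => rw [pvCloseA]; simp_all

theorem pvCloseA_zero : ∀ ls : List (List Char), pvCloseA ls 0 = fenceIdx ls := by
  intro ls
  induction ls with
  | nil => rw [pvCloseA]; simp [fenceIdx]
  | cons l ls ih =>
    rw [pvCloseA]
    by_cases hf : pvFence l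
    · simp [hf, fenceIdx]
    · simpa [hf, fenceIdx, pvCloseA_shift] using congrArg (Option.map (· + 1)) ih

theorem pvFieldA_shift (ls : List (List Char)) (l : List Char) :
    ∀ i c, pvFieldA (l :: ls) (i + 1) (c + 1) = (pvFieldA ls i c).map (· + 1) := by
  intro i c
  fun_induction pvFieldA ls i c with
  | case1 i hlt hf => rw [pvFieldA]; simp_all [List.getD_cons_succ]
  | case2 i hlt hf ih => rw [pvFieldA]; simp_all [List.getD_cons_succ]
  | case3 i hge => rw [pvFieldA]; simp_all

theorem pvFieldA_zero : ∀ (ls : List (List Char)) (c : Nat), c ≤ ls.length →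
    pvFieldA ls 0 c = fieldIdxB ls c := by
  intro ls
  induction ls with
  | nil =>
    intro c hc
    have h0 : c = 0 := by simpa using hc
    subst h0
    rw [pvFieldA]; simp [fieldIdxB]
  | cons l ls ih =>
    intro c hc
    rw [pvFieldA]
    cases c with
    | zero => simp [fieldIdxB]
    | succ c =>
      by_cases hf : pvFieldP l
      · simp [hf, fieldIdxB]
      · have hc2 : c ≤ ls.length := by simpa using hc
        simpa [hf, fieldIdxB, pvFieldA_shift] using congrArg (Option.map (· + 1)) (ih c hc2)

-- B loop lemmas
theorem foldl_closed (e : Bool) : ∀ (ls : List (List Char)) (out : List (List Char)) (fs ch : Bool),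
    ls.foldl (pvStepB e) (out, fs, true, ch) = (out ++ ls, fs, true, ch) := by
  intro ls
  induction ls with
  | nil => simp
  | cons l ls ih => intro out fs ch; simp [pvStepB, ih]

theorem foldl_seen_none (e : Bool) : ∀ (ls : List (List Char)) (out : List (List Char)) (ch : Bool),
    fenceIdx ls = none →
    ∃ out', ls.foldl (pvStepB e) (out, true, false, ch) = (out', true, false, ch) := by
  intro ls
  induction ls with
  | nil => exact fun out ch _ => ⟨out, rfl⟩
  | cons l ls ih =>
    intro out ch h
    cases hf : pvFence l with
    | true => simp [fenceIdx, hf] at h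
    | false =>
      have h2 : fenceIdx ls = none := by simpa [fenceIdx, hf] using h
      simpa [pvStepB, hf] using ih (out ++ [l]) ch h2

theorem foldl_seen_some (e : Bool) : ∀ (ls : List (List Char)) (out : List (List Char)) (ch : Bool) (c : Nat),
    fenceIdx ls = some c →
    ls.foldl (pvStepB e) (out, true, false, ch) = (out ++ ls, true, true, ch) := by
  intro ls
  induction ls with
  | nil => simp [fenceIdx]
  | cons l ls ih =>
    intro out ch c h
    cases hf : pvFence l with
    | true => simp [pvStepB, hf, foldl_closed]
    | false =>
      simp [fenceIdx, hf] at h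
      obtain ⟨c2, hc2, -⟩ := h
      simpa [pvStepB, hf] using ih (out ++ [l]) ch c2 hc2

theorem foldl_fresh_none (e : Bool) : ∀ (ls : List (List Char)) (out : List (List Char)),
    fenceIdx ls = none →
    ∃ out' fs ch, ls.foldl (pvStepB e) (out, false, false, false) = (out', fs, false, ch) := by
  intro ls
  induction ls with
  | nil => exact fun out _ => ⟨out, false, false, rfl⟩
  | cons l ls ih =>
    intro out h
    cases hf : pvFence l with
    | true => simp [fenceIdx, hf] at h
    | false =>
    have h' : fenceIdx ls = none := by simpa [fenceIdx, hf] using h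
    by_cases hp : pvFieldP l
    · by_cases he : e
      · by_cases hv : pvValTrue l
        · obtain ⟨o', ho'⟩ := foldl_seen_none e ls (out ++ [l]) false h'
          exact ⟨o', true, false, by simpa [pvStepB, hf, hp, he, hv] using ho'⟩
        · obtain ⟨o', ho'⟩ := foldl_seen_none e ls (out ++ [pvFieldLine]) true h'
          exact ⟨o', true, true, by simpa [pvStepB, hf, hp, he, hv] using ho'⟩
      · obtain ⟨o', ho'⟩ := foldl_seen_none e ls out true h'
        exact ⟨o', true, true, by simpa [pvStepB, hf, hp, he] using ho'⟩
    · obtain ⟨o', fs, ch, ho'⟩ := ih (out ++ [l]) h'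
      exact ⟨o', fs, ch, by simpa [pvStepB, hf, hp] using ho'⟩

theorem foldl_fresh_some (e : Bool) : ∀ (ls : List (List Char)) (out res : List (List Char)) (ch : Bool),
    canon e ls = some (res, ch) →
    ∃ fs, ls.foldl (pvStepB e) (out, false, false, false) = (out ++ res, fs, true, ch) := by
  intro ls
  induction ls with
  | nil => simp [canon, fenceIdx]
  | cons l ls ih =>
    intro out res ch h
    cases hf : pvFence l with
    | true =>
      have hcan : canon e (l :: ls) =
          if e then some (pvFieldLine :: l :: ls, true) else some (l :: ls, false) := by
        simp [canon, fenceIdx, hf, fieldIdxB]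
      rw [hcan] at h
      cases he : e with
      | true =>
        rw [he] at h
        simp only [if_true, Option.some_inj, Prod.mk.injEq] at h
        obtain ⟨h1, h2⟩ := h
        subst h1; subst h2
        exact ⟨false, by simp [pvStepB, hf, he, foldl_closed]⟩
      | false =>
        rw [he] at h
        simp only [Bool.false_eq_true, if_false, Option.some_inj, Prod.mk.injEq] at h
        obtain ⟨h1, h2⟩ := h
        subst h1; subst h2
        exact ⟨false, by simp [pvStepB, hf, he, foldl_closed]⟩
    | false =>
      rcases hfi : fenceIdx ls with _ | c
      · simp [canon, fenceIdx, hf, hfi] at h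
      · have hcc : fenceIdx (l :: ls) = some (c + 1) := by simp [fenceIdx, hf, hfi]
        cases hp : pvFieldP l with
        | true =>
          have hcan : canon e (l :: ls) =
              if e then (if pvValTrue l then some (l :: ls, false) else some (pvFieldLine :: ls, true))
              else some (ls, true) := by
            simp [canon, hcc, fieldIdxB, hp]
          rw [hcan] at h
          cases he : e with
          | true =>
            rw [he] at h
            cases hv : pvValTrue l with
            | true =>
              rw [hv] at h
              simp only [if_true, Option.some_inj, Prod.mk.injEq] at h
              obtain ⟨h1, h2⟩ := h
              subst h1; subst h2
              exact ⟨true, by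
                simpa [pvStepB, hf, hp, he, hv] using foldl_seen_some e ls (out ++ [l]) false c hfi⟩
            | false =>
              rw [hv] at h
              simp only [Bool.false_eq_true, if_false, if_true, Option.some_inj, Prod.mk.injEq] at h
              obtain ⟨h1, h2⟩ := h
              subst h1; subst h2
              exact ⟨true, by
                simpa [pvStepB, hf, hp, he, hv] using
                  foldl_seen_some e ls (out ++ [pvFieldLine]) true c hfi⟩
          | false =>
            rw [he] at h
            simp only [Bool.false_eq_true, if_false, Option.some_inj, Prod.mk.injEq] at h
            obtain ⟨h1, h2⟩ := h
            subst h1; subst h2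
            exact ⟨true, by
              simpa [pvStepB, hf, hp, he] using foldl_seen_some e ls out true c hfi⟩
        | false =>
          have hshift : canon e (l :: ls) = (canon e ls).map (fun p => (l :: p.1, p.2)) := by
            rcases hfd : fieldIdxB ls c with _ | fi
            · simp [canon, hcc, fieldIdxB, hp, hfd, hfi, List.take_succ_cons, List.drop_succ_cons]
              cases e <;> simp
            · simp [canon, hcc, fieldIdxB, hp, hfd, hfi, List.getD_cons_succ, List.set_cons_succ,
                List.eraseIdx_cons_succ]
              cases e
              · simp
              · by_cases hv : pvValTrue (ls[fi]?.getD []) = true <;> simp [hv]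
          rw [hshift] at h
          rcases hcs : canon e ls with _ | ⟨res2, ch2⟩
          · simp [hcs] at h
          · rw [hcs] at h
            simp only [Option.map_some, Option.some_inj, Prod.mk.injEq] at h
            obtain ⟨h1, h2⟩ := h
            subst h1; subst h2
            obtain ⟨fs, hfold⟩ := ih (out ++ [l]) res2 ch2 hcs
            exact ⟨fs, by simpa [pvStepB, hf, hp] using hfold⟩

theorem fenceIdx_lt : ∀ (ls : List (List Char)) (c : Nat), fenceIdx ls = some c → c < ls.length := by
  intro ls
  induction ls with
  | nil => simp [fenceIdx]
  | cons l ls ih =>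
    intro c h
    by_cases hf : pvFence l
    · simp [fenceIdx, hf] at h; simp only [List.length_cons]; omega
    · simp [fenceIdx, hf] at h
      obtain ⟨c2, hc2, rfl⟩ := h
      have := ih c2 hc2
      simp; omega

-- ===== VERDICT (by name: the statement is the Claim_ definition above) =====
theorem set_disable_model_invocation_in_text_py_spec : Claim_equal_set_disable_model_invocation_in_text_py := by
  intro content enable _
  unfold Spec_set_disable_model_invocation_in_text_py
  unfold set_disable_model_invocation_in_text_py set_disable_model_invocation_in_text_py_alt
  rcases hls : pvSplitKeep content.toList with _ | ⟨l0, rest⟩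
  · simp
  · cases hfv : pvFence l0 with
    | false => simp [hfv]
    | true =>
      have hclose : pvCloseA (l0 :: rest) 1 = (fenceIdx rest).map (· + 1) := by
        have h0 := pvCloseA_shift rest l0 0
        rw [h0, pvCloseA_zero]
      rcases hfe : fenceIdx rest with _ | c
      · obtain ⟨out2, fs, ch, hB⟩ := foldl_fresh_none enable rest [l0] hfe
        simp [hfv, hclose, hfe, hB]
      · have hclen : c < rest.length := fenceIdx_lt rest c hfe
        have hcloseS : pvCloseA (l0 :: rest) 1 = some (c + 1) := by rw [hclose, hfe]; rfl
        have hfield : pvFieldA (l0 :: rest) 1 (c + 1) = (fieldIdxB rest c).map (· + 1) := by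
          rw [pvFieldA_shift, pvFieldA_zero rest c (le_of_lt hclen)]
        rcases hfd : fieldIdxB rest c with _ | fi
        · have hfieldS : pvFieldA (l0 :: rest) 1 (c + 1) = none := by rw [hfield, hfd]; rfl
          cases he : enable with
          | true =>
            have hcan : canon true rest = some (rest.take c ++ pvFieldLine :: rest.drop c, true) := by
              simp [canon, hfe, hfd]
            obtain ⟨fs, hB⟩ := foldl_fresh_some true rest [l0] _ _ hcan
            have hins := PySem.List.insert_natCast (l0 :: rest) (c + 1) pvFieldLine
              (by simp only [List.length_cons]; omega)
            simp only [List.take_succ_cons, List.drop_succ_cons] at hins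
            push_cast at hins
            simp [hfv, he, hcloseS, hfieldS, hins, hB]
          | false =>
            have hcan : canon false rest = some (rest, false) := by simp [canon, hfe, hfd]
            obtain ⟨fs, hB⟩ := foldl_fresh_some false rest [l0] _ _ hcan
            simp [hfv, he, hcloseS, hfieldS, hB]
        · have hfieldS : pvFieldA (l0 :: rest) 1 (c + 1) = some (fi + 1) := by rw [hfield, hfd]; rfl
          cases he : enable with
          | true =>
            cases hv : pvValTrue (rest[fi]?.getD []) with
            | true =>
              have hcan : canon true rest = some (rest, false) := by simp [canon, hfe, hfd, hv]
              obtain ⟨fs, hB⟩ := foldl_fresh_some true rest [l0] _ _ hcan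
              simp [hfv, he, hcloseS, hfieldS, List.getD_cons_succ, hv, hB]
            | false =>
              have hcan : canon true rest = some (rest.set fi pvFieldLine, true) := by
                simp [canon, hfe, hfd, hv]
              obtain ⟨fs, hB⟩ := foldl_fresh_some true rest [l0] _ _ hcan
              simp [hfv, he, hcloseS, hfieldS, List.getD_cons_succ, hv, hB, List.set_cons_succ]
          | false =>
            have hcan : canon false rest = some (rest.eraseIdx fi, true) := by
              simp [canon, hfe, hfd]
            obtain ⟨fs, hB⟩ := foldl_fresh_some false rest [l0] _ _ hcan
            simp [hfv, he, hcloseS, hfieldS, hB, List.eraseIdx_cons_succ]
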